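-- pv_equiv track=rewrite | github.com/vinjung/alphafolio_quant | us/us_market_classifier.py | _get_group_distribution
-- ===== SOURCE A (Python) =====
-- from typing import Dict, List, Optional
--
-- def _get_group_distribution(classifications: Dict[str, str]) -> Dict:
--     """
--     Get distribution by group (A, B, C, D, E, F, OTHER)
--
--     Args:
--         classifications: Dict of {symbol: classification_name}
--
--     Returns:
--         Dict of {group: count}
--     """
--     group_counts = {'A': 0, 'B': 0, 'C': 0, 'D': 0, 'E': 0, 'F': 0, 'OTHER': 0}
--
--     for state in classifications.values():
--         if state == 'OTHER':
--             group_counts['OTHER'] += 1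
--         elif state.startswith('A'):
--             group_counts['A'] += 1
--         elif state.startswith('B'):
--             group_counts['B'] += 1
--         elif state.startswith('C'):
--             group_counts['C'] += 1
--         elif state.startswith('D'):
--             group_counts['D'] += 1
--         elif state.startswith('E'):
--             group_counts['E'] += 1
--         elif state.startswith('F'):
--             group_counts['F'] += 1
--
--     return group_counts
-- ===== SOURCE B (Python) =====
-- from typing import Dict
--
--
-- def _get_group_distribution(classifications: Dict[str, str]) -> Dict:
--     vals = list(classifications.values())
--     dist = {g: sum(s.startswith(g) for s in vals) for g in 'ABCDEF'}
--     dist['OTHER'] = vals.count('OTHER')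
--     return dist
-- ===== Notes on version B (the rewrite author's own statement) =====
-- stated objective: alternative
-- what changed: Replaces A's single pass with a seven-way if/elif cascade updating a mutable counts dict by seven independent staged passes: one sum(s.startswith(g)) scan per letter group A-F plus a vals.count('OTHER') scan, with no per-element dispatch or accumulator dict at all (correct because the cascade's buckets are mutually exclusive, so each group's count is just the number of values satisfying its own predicate).
import Mathlib
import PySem

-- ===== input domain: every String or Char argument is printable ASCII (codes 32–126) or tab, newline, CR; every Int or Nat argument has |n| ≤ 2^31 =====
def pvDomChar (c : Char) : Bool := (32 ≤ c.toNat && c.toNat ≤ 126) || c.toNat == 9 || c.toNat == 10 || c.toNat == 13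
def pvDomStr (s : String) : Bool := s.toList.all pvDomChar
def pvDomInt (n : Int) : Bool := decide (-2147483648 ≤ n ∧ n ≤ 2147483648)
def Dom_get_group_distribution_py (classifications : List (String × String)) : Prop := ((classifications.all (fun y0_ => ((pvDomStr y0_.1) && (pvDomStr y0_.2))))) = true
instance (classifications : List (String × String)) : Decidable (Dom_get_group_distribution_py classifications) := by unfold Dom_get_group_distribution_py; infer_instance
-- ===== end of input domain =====

-- B replaces A's single accumulator-dict pass with seven independent staged passes
-- (one startswith-count scan per letter group plus a count('OTHER') scan) — a different
-- decomposition with the same behaviour; it is correct because the cascade's buckets are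
-- mutually exclusive, so each group's count is the count of its own predicate alone.

-- ===== PORT A =====
-- the body of A's for-loop: the if/elif cascade over one classification value
def gdStepA (d : PySem.Dict String Int) (s : String) : PySem.Dict String Int :=
  if s == "OTHER" then d.modify "OTHER" 0 (· + 1)
  else if PySem.Str.startswith s "A" then d.modify "A" 0 (· + 1)
  else if PySem.Str.startswith s "B" then d.modify "B" 0 (· + 1)
  else if PySem.Str.startswith s "C" then d.modify "C" 0 (· + 1)
  else if PySem.Str.startswith s "D" then d.modify "D" 0 (· + 1)
  else if PySem.Str.startswith s "E" then d.modify "E" 0 (· + 1)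
  else if PySem.Str.startswith s "F" then d.modify "F" 0 (· + 1)
  else d

def get_group_distribution_py (classifications : List (String × String)) : List (String × Int) :=
  ((PySem.Dict.ofList classifications).values.foldl gdStepA
    (PySem.Dict.ofList [("A", (0:Int)), ("B", 0), ("C", 0), ("D", 0), ("E", 0), ("F", 0), ("OTHER", 0)])).items

-- ===== PORT B =====
def get_group_distribution_py_alt (classifications : List (String × String)) : List (String × Int) :=
  let vals := (PySem.Dict.ofList classifications).values
  -- {g: sum(s.startswith(g) for s in vals) for g in 'ABCDEF'} followed by dist['OTHER'] = vals.count('OTHER')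
  (["A", "B", "C", "D", "E", "F"].map
      (fun g => (g, (vals.map (fun s => if PySem.Str.startswith s g then (1:Int) else 0)).sum)))
    ++ [("OTHER", (PySem.List.count vals "OTHER" : Int))]

-- ===== PRECONDITION & SPEC =====
def Spec_get_group_distribution_py (classifications : List (String × String)) (out : List (String × Int)) : Prop := out = get_group_distribution_py_alt classifications
instance (classifications : List (String × String)) (out : List (String × Int)) : Decidable (Spec_get_group_distribution_py classifications out) := by unfold Spec_get_group_distribution_py; infer_instance

-- ===== CLAIM (what is proved, stated in full; the proofs are below) =====
def Claim_equal_get_group_distribution_py : Prop := ∀ (classifications : List (String × String)), Dom_get_group_distribution_py classifications → Spec_get_group_distribution_py classifications (get_group_distribution_py classifications)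

-- ===== LEMMAS AND PROOFS =====

-- A's counts dict with symbolic entries (its keys never change during the loop)
def gdD (a b c d e f o : Int) : PySem.Dict String Int :=
  PySem.Dict.mk [("A", a), ("B", b), ("C", c), ("D", d), ("E", e), ("F", f), ("OTHER", o)]

lemma gd_startswith_head (s : String) (ch : Char) (t : List Char) (hs : s.toList = ch :: t)
    (p : String) (c : Char) (hp : p.toList = [c]) :
    PySem.Str.startswith s p = (ch == c) := by
  by_cases h : ch = c
  · subst h
    simp only [beq_self_eq_true]
    rw [PySem.Str.startswith_eq, PySem.Chars.startswith_iff, hs, hp]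
    simp [List.cons_prefix_cons]
  · have : ¬ (PySem.Str.startswith s p = true) := by
      rw [PySem.Str.startswith_eq, PySem.Chars.startswith_iff, hs, hp]
      simp [List.cons_prefix_cons]
      intro hc; exact (h hc.symm).elim
    simp only [Bool.not_eq_true] at this
    rw [this]
    simp [h]

-- the per-element step of A's loop, phrased with the (mutually exclusive) predicates B counts
lemma gdStepA_eq (a b c d e f o : Int) (s : String) :
    gdStepA (gdD a b c d e f o) s =
      gdD (a + if PySem.Str.startswith s "A" then 1 else 0)
          (b + if PySem.Str.startswith s "B" then 1 else 0)
          (c + if PySem.Str.startswith s "C" then 1 else 0)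
          (d + if PySem.Str.startswith s "D" then 1 else 0)
          (e + if PySem.Str.startswith s "E" then 1 else 0)
          (f + if PySem.Str.startswith s "F" then 1 else 0)
          (o + if s = "OTHER" then 1 else 0) := by
  by_cases hO : s = "OTHER"
  · subst hO
    simp [gdStepA, gdD, PySem.Dict.modify, PySem.Dict.insert, PySem.Dict.getD, PySem.Dict.get?]
    decide
  · have hO' : (s == "OTHER") = false := by simpa using hO
    rcases hs : s.toList with _ | ⟨ch, t⟩
    · have hs' : s = "" := by
        have := congrArg String.ofList hs; simpa using this
      subst hs'
      simp [gdStepA, gdD,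
        show PySem.Chars.startswith ([] : List Char) ['A'] = false from by decide,
        show PySem.Chars.startswith ([] : List Char) ['B'] = false from by decide,
        show PySem.Chars.startswith ([] : List Char) ['C'] = false from by decide,
        show PySem.Chars.startswith ([] : List Char) ['D'] = false from by decide,
        show PySem.Chars.startswith ([] : List Char) ['E'] = false from by decide,
        show PySem.Chars.startswith ([] : List Char) ['F'] = false from by decide]
    · have hA := gd_startswith_head s ch t hs "A" 'A' (by decide)
      have hB := gd_startswith_head s ch t hs "B" 'B' (by decide)
      have hC := gd_startswith_head s ch t hs "C" 'C' (by decide)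
      have hD := gd_startswith_head s ch t hs "D" 'D' (by decide)
      have hE := gd_startswith_head s ch t hs "E" 'E' (by decide)
      have hF := gd_startswith_head s ch t hs "F" 'F' (by decide)
      simp only [gdStepA, hO', hA, hB, hC, hD, hE, hF, Bool.false_eq_true, if_false, hO,
        beq_iff_eq]
      by_cases h1 : ch = 'A'
      · simp [h1, gdD, PySem.Dict.modify, PySem.Dict.insert, PySem.Dict.getD, PySem.Dict.get?]
      · by_cases h2 : ch = 'B'
        · simp [h1, h2, gdD, PySem.Dict.modify, PySem.Dict.insert, PySem.Dict.getD, PySem.Dict.get?]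
        · by_cases h3 : ch = 'C'
          · simp [h1, h2, h3, gdD, PySem.Dict.modify, PySem.Dict.insert, PySem.Dict.getD, PySem.Dict.get?]
          · by_cases h4 : ch = 'D'
            · simp [h1, h2, h3, h4, gdD, PySem.Dict.modify, PySem.Dict.insert, PySem.Dict.getD, PySem.Dict.get?]
            · by_cases h5 : ch = 'E'
              · simp [h1, h2, h3, h4, h5, gdD, PySem.Dict.modify, PySem.Dict.insert, PySem.Dict.getD, PySem.Dict.get?]
              · by_cases h6 : ch = 'F'
                · simp [h1, h2, h3, h4, h5, h6, gdD, PySem.Dict.modify, PySem.Dict.insert, PySem.Dict.getD, PySem.Dict.get?]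
                · simp [h1, h2, h3, h4, h5, h6, gdD]

-- A's whole loop computes, in each slot, that slot's predicate count over the values
lemma gdLoop (vals : List String) (a b c d e f o : Int) :
    vals.foldl gdStepA (gdD a b c d e f o) =
      gdD (a + ((vals.countP (fun s => PySem.Str.startswith s "A")) : Int))
          (b + ((vals.countP (fun s => PySem.Str.startswith s "B")) : Int))
          (c + ((vals.countP (fun s => PySem.Str.startswith s "C")) : Int))
          (d + ((vals.countP (fun s => PySem.Str.startswith s "D")) : Int))
          (e + ((vals.countP (fun s => PySem.Str.startswith s "E")) : Int))
          (f + ((vals.countP (fun s => PySem.Str.startswith s "F")) : Int))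
          (o + ((vals.count "OTHER") : Int)) := by
  induction vals generalizing a b c d e f o with
  | nil => simp
  | cons s rest ih =>
    rw [List.foldl_cons, gdStepA_eq, ih]
    simp only [List.countP_cons, List.count_cons, gdD, PySem.Dict.mk.injEq, List.cons.injEq,
      Prod.mk.injEq, beq_iff_eq, true_and, and_true]
    refine ⟨?_, ?_, ?_, ?_, ?_, ?_, ?_⟩ <;> (split_ifs with h <;> simp_all <;> push_cast <;> ring)

-- a 0/1 sum over a list IS the predicate count (bridges B's per-group sums to countP)
lemma gd_sum_ite {α : Type} (l : List α) (p : α → Bool) :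
    (l.map (fun x => if p x then (1:Int) else 0)).sum = ((l.countP p : Nat) : Int) := by
  induction l with
  | nil => simp
  | cons x t ih =>
    simp only [List.map_cons, List.sum_cons, List.countP_cons, ih]
    split_ifs with h <;> simp [h] <;> push_cast <;> ring

-- ===== VERDICT (by name: the statement is the Claim_ definition above) =====
theorem get_group_distribution_py_spec : Claim_equal_get_group_distribution_py := by
  unfold Claim_equal_get_group_distribution_py
  intro cls _
  unfold Spec_get_group_distribution_py
  unfold get_group_distribution_py get_group_distribution_py_alt
  rw [show (PySem.Dict.ofList [("A", (0:Int)), ("B", 0), ("C", 0), ("D", 0), ("E", 0), ("F", 0), ("OTHER", 0)]) = gdD 0 0 0 0 0 0 0 from rfl]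
  rw [gdLoop]
  simp [gdD, PySem.List.count_eq]
  exact ⟨(gd_sum_ite _ _).symm, (gd_sum_ite _ _).symm, (gd_sum_ite _ _).symm,
    (gd_sum_ite _ _).symm, (gd_sum_ite _ _).symm, (gd_sum_ite _ _).symm⟩
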